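-- pv_equiv track=rewrite | github.com/kovaielelarasanc/HIMS_Backend | app/services/emr_all_service.py | norm_code
-- ===== SOURCE A (Python) =====
-- from typing import Any, Dict, List, Optional, Tuple, Iterable
--
-- def norm_code(v: str) -> str:
--     s = str(v or "").strip().upper()
--     if not s:
--         return ""
--     s = s.replace(" ", "_")
--     out: List[str] = []
--     for ch in s:
--         if ch.isalnum() or ch in {"_", "-"}:
--             out.append(ch)
--     return "".join(out).strip("_")
-- ===== SOURCE B (Python) =====
-- def norm_code(v: str) -> str:
--     # Single-pass streaming state machine: instead of A's staged pipeline
--     # (strip, upper, replace, filter loop, join, strip('_')) we walk the raw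
--     # string once, emitting kept characters immediately and buffering runs of
--     # would-be underscores (spaces/'_') in a counter; a buffered run is flushed
--     # only when a real character follows, so leading/trailing underscores (and
--     # edge whitespace) are never produced and no strip pass is needed.
--     out = []
--     pending = 0  # underscores seen since the last emitted real character
--     for ch in (v or ""):
--         if ch == ' ' or ch == '_':
--             if out:
--                 pending += 1
--         elif ch.isalnum() or ch == '-':
--             out.append('_' * pending)
--             out.append(ch.upper())
--             pending = 0
--         # any other character is dropped; the buffered run stays pending
--     return ''.join(out)
-- ===== Notes on version B (the rewrite author's own statement) =====
-- stated objective: alternative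
-- what changed: Replaces A's staged pipeline (strip, upper, replace, filtering loop, join, final strip of underscores) with a single-pass streaming state machine over the raw string that emits kept characters immediately and buffers runs of separator characters (space and underscore) in a counter, flushing a run only when a real character follows, so no strip pass exists at all.
import Mathlib
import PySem

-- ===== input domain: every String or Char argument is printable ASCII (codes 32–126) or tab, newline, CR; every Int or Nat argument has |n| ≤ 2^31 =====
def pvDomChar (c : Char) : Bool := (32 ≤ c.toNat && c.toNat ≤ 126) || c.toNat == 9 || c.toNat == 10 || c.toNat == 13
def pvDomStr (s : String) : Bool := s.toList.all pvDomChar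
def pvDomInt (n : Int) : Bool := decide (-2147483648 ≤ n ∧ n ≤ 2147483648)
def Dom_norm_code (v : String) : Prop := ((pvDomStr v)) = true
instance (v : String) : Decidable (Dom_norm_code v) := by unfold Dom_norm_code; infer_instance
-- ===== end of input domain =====

-- B replaces A's staged pipeline (strip/upper/replace/filter-loop/join/strip('_')) by a
-- single-pass streaming state machine with a pending-underscore counter; same return value.
-- ===== PORT A =====
-- ch.isalnum() or ch in {"_", "-"}  (set-literal membership of a single character)
def normCodeKeepA (ch : Char) : Bool := PySem.Chars.isalnum ch || ch == '_' || ch == '-'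

def norm_code (v : String) : String :=
  -- s = str(v or "").strip().upper()
  let s := PySem.Chars.upper (PySem.Chars.strip (if v == "" then "" else v).toList)
  -- if not s: return ""
  if s.isEmpty then "" else
    -- s = s.replace(" ", "_")
    let s2 := PySem.Chars.replace s [' '] ['_']
    -- out = []; for ch in s: if …: out.append(ch)
    let out := s2.foldl (fun acc ch => if normCodeKeepA ch then acc ++ [ch] else acc) ([] : List Char)
    -- return "".join(out).strip("_")
    String.ofList (PySem.Chars.stripChars (PySem.Chars.join [] (out.map (fun c => [c]))) ['_'])

-- ===== PORT B =====
-- loop body: ' '/'_' increment the pending counter (only once something was emitted);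
-- a kept character flushes '_' * pending then appends ch.upper(); anything else is dropped
def normStepB (st : List Char × Nat) (ch : Char) : List Char × Nat :=
  if ch == ' ' || ch == '_' then
    (st.1, if st.1.isEmpty then st.2 else st.2 + 1)
  else if PySem.Chars.isalnum ch || ch == '-' then
    (st.1 ++ List.replicate st.2 '_' ++ [PySem.Chars.upperChar ch], 0)
  else st

def norm_code_alt (v : String) : String :=
  String.ofList ((if v == "" then "" else v).toList.foldl normStepB (([] : List Char), 0)).1

-- ===== PRECONDITION & SPEC =====
def Spec_norm_code (v : String) (out : String) : Prop := out = norm_code_alt v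
instance (v : String) (out : String) : Decidable (Spec_norm_code v out) := by unfold Spec_norm_code; infer_instance

-- ===== CLAIM (what is proved, stated in full; the proofs are below) =====
def Claim_equal_norm_code : Prop := ∀ (v : String), Dom_norm_code v → Spec_norm_code v (norm_code v)

-- ===== LEMMAS AND PROOFS =====

-- proof-only intermediate: the per-character emission both pipelines realise
-- (' '/'_' emit '_', kept characters emit their uppercase, the rest emit nothing)
def normCodeEmit (ch : Char) : Option Char :=
  if ch == ' ' || PySem.Chars.isalnum ch || ch == '_' || ch == '-' then
    some (if ch == ' ' then '_' else PySem.Chars.upperChar ch)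
  else none

-- per-character agreement of A's pipeline with the emit function
theorem pv_charLemma (c : Char) :
    (if normCodeKeepA (if (' ' == PySem.Chars.upperChar c) = true then '_' else PySem.Chars.upperChar c) = true
     then some (if (' ' == PySem.Chars.upperChar c) = true then '_' else PySem.Chars.upperChar c) else none)
      = normCodeEmit c := by
  by_cases hs : c = ' '
  · subst hs; decide
  · have hne : (c == ' ') = false := by simp [hs]
    have hne' : (' ' == c) = false := by
      simp only [beq_eq_false_iff_ne, ne_eq]; exact fun h => hs h.symm
    by_cases hl : PySem.Chars.islower c = true
    · have hl' : ('a' : Char) ≤ c ∧ c ≤ 'z' := by simpa [PySem.Chars.islower] using hl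
      have h1 : 97 ≤ c.toNat := Char.le_def.mp hl'.1
      have h2 : c.toNat ≤ 122 := Char.le_def.mp hl'.2
      have hval : (c.toNat - 32).isValidChar := by unfold Nat.isValidChar; omega
      have htn : (Char.ofNat (c.toNat - 32)).toNat = c.toNat - 32 := by
        rw [Char.toNat_ofNat, if_pos hval]
      have hu : PySem.Chars.upperChar c = Char.ofNat (c.toNat - 32) := by
        simp [PySem.Chars.upperChar, hl]
      have hA : ('A' : Char).toNat = 65 := rfl
      have hZ : ('Z' : Char).toNat = 90 := rfl
      have hupper : PySem.Chars.isupper (Char.ofNat (c.toNat - 32)) = true := by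
        unfold PySem.Chars.isupper
        rw [Bool.and_eq_true, decide_eq_true_eq, decide_eq_true_eq]
        have ha' : ('A' : Char).toNat ≤ (Char.ofNat (c.toNat - 32)).toNat := by rw [htn, hA]; omega
        have hz' : (Char.ofNat (c.toNat - 32)).toNat ≤ ('Z' : Char).toNat := by rw [htn, hZ]; omega
        exact ⟨Char.le_def.mpr (UInt32.le_iff_toNat_le.mpr ha'), Char.le_def.mpr (UInt32.le_iff_toNat_le.mpr hz')⟩
      have hdne' : ((' ' : Char) == (Char.ofNat (c.toNat - 32))) = false := by
        simp only [beq_eq_false_iff_ne, ne_eq]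
        intro h
        have h32 : (' ' : Char).toNat = 32 := rfl
        have := congrArg Char.toNat h.symm
        rw [htn, h32] at this; omega
      rw [hu]
      simp [normCodeKeepA, normCodeEmit, hdne', hne, PySem.Chars.isalnum, PySem.Chars.isalpha, hupper, hl]
      exact hu.symm
    · have hu : PySem.Chars.upperChar c = c := by simp [PySem.Chars.upperChar, hl]
      rw [hu]
      simp [normCodeKeepA, hne, hne', normCodeEmit, PySem.Chars.upperChar, hl]

-- single-character replace is a map
theorem pv_replace_go_single (a b : Char) :
    ∀ (l : List Char) (fuel : Nat) (acc : List Char), l.length ≤ fuel →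
      PySem.Chars.replace.go [a] [b] fuel l acc
        = acc.reverse ++ l.map (fun c => if a == c then b else c) := by
  intro l
  induction l with
  | nil => intro fuel acc h; cases fuel <;> simp [PySem.Chars.replace.go]
  | cons c t ih =>
    intro fuel acc h
    cases fuel with
    | zero => simp at h
    | succ f =>
      simp only [PySem.Chars.replace.go]
      by_cases hac : a = c
      · subst hac
        have hpre : [a].isPrefixOf (a :: t) = true := by simp [List.isPrefixOf]
        rw [if_pos hpre]
        have := ih f (b :: acc) (by simpa using h)
        simpa [this]
      · have hpre : [a].isPrefixOf (c :: t) = false := by simp [List.isPrefixOf, hac]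
        rw [hpre]
        simp only [Bool.false_eq_true, if_false]
        have := ih f (c :: acc) (by simpa using h)
        simp [this, hac]

theorem pv_replace_single (s : List Char) (a b : Char) :
    PySem.Chars.replace s [a] [b] = s.map (fun c => if a == c then b else c) := by
  unfold PySem.Chars.replace
  simp only [List.isEmpty_cons, Bool.false_eq_true, if_false]
  simpa using pv_replace_go_single a b s s.length [] le_rfl

-- generic: a filter-after-map pipeline is a filterMap, given pointwise agreement
theorem pv_filter_map_eq_filterMap {α β : Type} (p : β → Bool) (f : α → β) (g : α → Option β)
    (hpt : ∀ c, (if p (f c) = true then some (f c) else none) = g c) :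
    ∀ l : List α, List.filter p (l.map f) = l.filterMap g := by
  intro l
  induction l with
  | nil => rfl
  | cons c t ih =>
    rw [List.map_cons, List.filter_cons, List.filterMap_cons, ← hpt c, ih]
    by_cases hp : p (f c) = true <;> simp [hp]

-- space characters other than ' ' emit nothing
theorem pv_isspace_ranges (c : Char) (h : PySem.Chars.isspace c = true) :
    c.toNat = 32 ∨ (9 ≤ c.toNat ∧ c.toNat ≤ 13) ∨ (28 ≤ c.toNat ∧ c.toNat ≤ 31) ∨ 133 ≤ c.toNat := by
  simp [PySem.Chars.isspace] at h; omega

theorem pv_space_emit (c : Char) (h : PySem.Chars.isspace c = true) (hs : c ≠ ' ') :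
    normCodeEmit c = none := by
  have hr := pv_isspace_ranges c h
  have halnum : PySem.Chars.isalnum c = false := by
    by_contra hb
    have hb' : PySem.Chars.isalnum c = true := by
      revert hb; cases (PySem.Chars.isalnum c) <;> simp
    have hcls : ('A' ≤ c ∧ c ≤ 'Z') ∨ ('a' ≤ c ∧ c ≤ 'z') ∨ ('0' ≤ c ∧ c ≤ '9') := by
      simpa [PySem.Chars.isalnum, PySem.Chars.isalpha, PySem.Chars.isupper,
             PySem.Chars.islower, PySem.Chars.isdigit, or_assoc] using hb'
    rcases hcls with ⟨ha, hb2⟩ | ⟨ha, hb2⟩ | ⟨ha, hb2⟩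
    · have h1 : 65 ≤ c.toNat := Char.le_def.mp ha
      have h2 : c.toNat ≤ 90 := Char.le_def.mp hb2
      omega
    · have h1 : 97 ≤ c.toNat := Char.le_def.mp ha
      have h2 : c.toNat ≤ 122 := Char.le_def.mp hb2
      omega
    · have h1 : 48 ≤ c.toNat := Char.le_def.mp ha
      have h2 : c.toNat ≤ 57 := Char.le_def.mp hb2
      omega
  unfold normCodeEmit
  rw [if_neg]
  simp only [Bool.or_eq_true, beq_iff_eq, not_or]
  refine ⟨⟨⟨hs, ?_⟩, ?_⟩, ?_⟩
  · simp [halnum]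
  · intro hh; subst hh; revert hr; decide
  · intro hh; subst hh; revert hr; decide

-- every character emitted from an all-space list is '_'
theorem pv_pad_emit (l : List Char) (h : ∀ c ∈ l, PySem.Chars.isspace c = true) :
    ∀ x ∈ l.filterMap normCodeEmit, x = '_' := by
  intro x hx
  rcases List.mem_filterMap.mp hx with ⟨c, hc, he⟩
  by_cases hsp : c = ' '
  · subst hsp
    simpa [normCodeEmit] using he.symm
  · rw [pv_space_emit c (h c hc) hsp] at he; cases he

theorem pv_dropWhile_all {α : Type} (p : α → Bool) (u l : List α) (h : ∀ x ∈ u, p x = true) :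
    List.dropWhile p (u ++ l) = List.dropWhile p l := by
  induction u with
  | nil => rfl
  | cons a t ih =>
    rw [List.cons_append, List.dropWhile_cons, if_pos (h a (by simp))]
    exact ih (fun x hx => h x (by simp [hx]))

theorem pv_stripChars_pad (u s w : List Char) (hu : ∀ x ∈ u, x = '_') (hw : ∀ x ∈ w, x = '_') :
    PySem.Chars.stripChars (u ++ s ++ w) ['_'] = PySem.Chars.stripChars s ['_'] := by
  unfold PySem.Chars.stripChars
  dsimp only
  have hq : ∀ x : Char, x = '_' → (['_'].contains x) = true := by intro x hx; subst hx; decide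
  have hu' : ∀ x ∈ u, (['_'].contains x) = true := fun x hx => hq x (hu x hx)
  have hw' : ∀ x ∈ w, (['_'].contains x) = true := fun x hx => hq x (hw x hx)
  rw [List.append_assoc, pv_dropWhile_all _ u _ hu']
  by_cases he : List.dropWhile (fun c => ['_'].contains c) s = []
  · have hall : ∀ x ∈ s, (['_'].contains x) = true := by
      simpa [List.dropWhile_eq_nil_iff] using he
    rw [pv_dropWhile_all _ s w hall, he]
    have hwnil : List.dropWhile (fun c => ['_'].contains c) w = [] := by
      simp [List.dropWhile_eq_nil_iff]; intro x hx; simpa using hw' x hx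
    rw [hwnil]
  · rw [List.dropWhile_append, if_neg (by simpa [List.isEmpty_iff] using he)]
    rw [List.reverse_append, pv_dropWhile_all _ w.reverse _ (by intro x hx; exact hw' x (by simpa using hx))]

-- strip splits the list into space padding around the stripped core
theorem pv_strip_decomp (cs : List Char) :
    ∃ u w, cs = u ++ PySem.Chars.strip cs ++ w ∧
      (∀ x ∈ u, PySem.Chars.isspace x = true) ∧ (∀ x ∈ w, PySem.Chars.isspace x = true) := by
  refine ⟨cs.takeWhile PySem.Chars.isspace,
          ((List.dropWhile PySem.Chars.isspace cs).reverse.takeWhile PySem.Chars.isspace).reverse, ?_, ?_, ?_⟩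
  · unfold PySem.Chars.strip PySem.Chars.rstrip PySem.Chars.lstrip
    conv_lhs => rw [← List.takeWhile_append_dropWhile (p := PySem.Chars.isspace) (l := cs)]
    rw [List.append_assoc]
    congr 1
    conv_lhs => rw [← List.reverse_reverse (List.dropWhile PySem.Chars.isspace cs),
      ← List.takeWhile_append_dropWhile (p := PySem.Chars.isspace)
          (l := (List.dropWhile PySem.Chars.isspace cs).reverse)]
    rw [List.reverse_append]
  · intro x hx; exact List.mem_takeWhile_imp hx
  · intro x hx; exact List.mem_takeWhile_imp (by simpa using hx)

-- A's result is the stripped emit stream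
theorem pv_A_eq_emit (cs : List Char) :
    (if (PySem.Chars.upper (PySem.Chars.strip cs)).isEmpty then ([] : List Char)
     else PySem.Chars.stripChars (PySem.Chars.join []
       (((PySem.Chars.replace (PySem.Chars.upper (PySem.Chars.strip cs)) [' '] ['_']).foldl
           (fun acc ch => if normCodeKeepA ch then acc ++ [ch] else acc) ([] : List Char)).map
         (fun c => [c]))) ['_'])
    = PySem.Chars.stripChars (cs.filterMap normCodeEmit) ['_'] := by
  obtain ⟨u, w, hcs, hu, hw⟩ := pv_strip_decomp cs
  have hB : cs.filterMap normCodeEmit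
      = (u.filterMap normCodeEmit) ++ ((PySem.Chars.strip cs).filterMap normCodeEmit)
          ++ (w.filterMap normCodeEmit) := by
    conv_lhs => rw [hcs]
    simp [List.filterMap_append]
  rw [hB, pv_stripChars_pad _ _ _ (pv_pad_emit u hu) (pv_pad_emit w hw)]
  by_cases hempty : PySem.Chars.strip cs = []
  · rw [hempty]
    simp [PySem.Chars.upper]
    decide
  · rw [if_neg (by simp [PySem.Chars.upper, List.isEmpty_iff, hempty])]
    rw [PySem.List.foldl_append_if normCodeKeepA (fun ch => ch)]
    simp only [List.nil_append, List.map_id']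
    rw [PySem.Chars.join_nil_singletons]
    rw [pv_replace_single]
    unfold PySem.Chars.upper
    rw [List.map_map]
    rw [pv_filter_map_eq_filterMap normCodeKeepA
      ((fun c => if (' ' == c) = true then '_' else c) ∘ PySem.Chars.upperChar) normCodeEmit
      (fun c => pv_charLemma c)]

-- the streaming step realises the emit function: case analysis on the emitted character
theorem pv_alnum_upper_ne_underscore (c : Char) (h : PySem.Chars.isalnum c = true) :
    PySem.Chars.upperChar c ≠ '_' := by
  have hcls : ('A' ≤ c ∧ c ≤ 'Z') ∨ ('a' ≤ c ∧ c ≤ 'z') ∨ ('0' ≤ c ∧ c ≤ '9') := by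
    simpa [PySem.Chars.isalnum, PySem.Chars.isalpha, PySem.Chars.isupper,
           PySem.Chars.islower, PySem.Chars.isdigit, or_assoc] using h
  intro he
  have h95 : PySem.Chars.upperChar c = '_' → (PySem.Chars.upperChar c).toNat = 95 := by
    intro hh; rw [hh]; rfl
  have := h95 he
  unfold PySem.Chars.upperChar at this
  by_cases hl : PySem.Chars.islower c = true
  · rw [if_pos hl] at this
    have hl' : ('a' : Char) ≤ c ∧ c ≤ 'z' := by simpa [PySem.Chars.islower] using hl
    have h1 : 97 ≤ c.toNat := Char.le_def.mp hl'.1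
    have h2 : c.toNat ≤ 122 := Char.le_def.mp hl'.2
    have hval : (c.toNat - 32).isValidChar := by unfold Nat.isValidChar; omega
    rw [Char.toNat_ofNat, if_pos hval] at this
    omega
  · rw [if_neg hl] at this
    rcases hcls with ⟨ha, hb⟩ | ⟨ha, hb⟩ | ⟨ha, hb⟩
    · have h1 : 65 ≤ c.toNat := Char.le_def.mp ha
      have h2 : c.toNat ≤ 90 := Char.le_def.mp hb
      omega
    · exact hl (by simp [PySem.Chars.islower, ha, hb])
    · have h1 : 48 ≤ c.toNat := Char.le_def.mp ha
      have h2 : c.toNat ≤ 57 := Char.le_def.mp hb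
      omega

-- fold invariant: the state is the lstripped emit stream split into flushed core + pending run,
-- the core never ends in '_' and an empty core forces an empty pending run
theorem pv_fold_main (cs : List Char) :
    ∀ (st : List Char × Nat) (m : List Char),
      st.1 ++ List.replicate st.2 '_' = List.dropWhile (fun c => c == '_') m →
      (st.1 = [] → st.2 = 0) →
      (∀ x, st.1.getLast? = some x → x ≠ '_') →
      let st' := cs.foldl normStepB st
      st'.1 ++ List.replicate st'.2 '_'
          = List.dropWhile (fun c => c == '_') (m ++ cs.filterMap normCodeEmit) ∧
        (st'.1 = [] → st'.2 = 0) ∧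
        (∀ x, st'.1.getLast? = some x → x ≠ '_') := by
  induction cs with
  | nil =>
    intro st m h1 h2 h3
    simpa using ⟨h1, h2, h3⟩
  | cons c t ih =>
    intro st m h1 h2 h3
    simp only [List.foldl_cons, List.filterMap_cons]
    -- relate normStepB st c and normCodeEmit c by the same case split
    by_cases hsp : c == ' ' || c == '_'
    · -- emits '_'
      have hemit : normCodeEmit c = some '_' := by
        rcases Bool.or_eq_true_iff.mp hsp with h | h
        · have := beq_iff_eq.mp h; subst this; rfl
        · have := beq_iff_eq.mp h; subst this; rfl
      have hstep : normStepB st c = (st.1, if st.1.isEmpty then st.2 else st.2 + 1) := by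
        unfold normStepB; rw [if_pos hsp]
      rw [hemit, hstep]
      by_cases hnil : st.1 = []
      · have hz : st.2 = 0 := h2 hnil
        have hm : List.dropWhile (fun c => c == '_') m = [] := by
          rw [← h1, hnil, hz]; rfl
        refine ih (st.1, if st.1.isEmpty then st.2 else st.2 + 1) (m ++ ['_']) ?_ ?_ ?_ |>.imp ?_ id
        · simp only [hnil, hz, List.isEmpty_nil, if_pos, List.replicate_zero,
            List.append_nil, List.nil_append]
          rw [List.dropWhile_append, if_pos (by simp [hm])]
          simp
        · intro _; simp [hz, hnil]
        · intro x hx; rw [hnil] at hx; simp at hx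
        · intro h; simpa using h
      · have hne : st.1.isEmpty = false := by simp [List.isEmpty_iff, hnil]
        have hdw : List.dropWhile (fun c => c == '_') m ≠ [] := by
          rw [← h1]; simp [hnil]
        refine ih (st.1, if st.1.isEmpty then st.2 else st.2 + 1) (m ++ ['_']) ?_ ?_ ?_ |>.imp ?_ id
        · rw [hne]
          simp only [Bool.false_eq_true, if_false]
          rw [List.dropWhile_append, if_neg (by simpa [List.isEmpty_iff] using hdw)]
          rw [← h1]
          simp [List.replicate_succ']
        · intro h; exact absurd h hnil
        · exact h3
        · intro h; simpa using h
    · by_cases hkeep : PySem.Chars.isalnum c || c == '-'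
      · -- emits a real (non-underscore) character
        have hc_ne_sp : (c == ' ') = false := by
          revert hsp; cases h : (c == ' ') <;> simp
        have hemit : normCodeEmit c = some (PySem.Chars.upperChar c) := by
          unfold normCodeEmit
          have hcond : (c == ' ' || PySem.Chars.isalnum c || c == '_' || c == '-') = true := by
            rcases Bool.or_eq_true_iff.mp hkeep with h | h <;> simp [h]
          rw [if_pos hcond, hc_ne_sp]
          simp
        have hreal : PySem.Chars.upperChar c ≠ '_' := by
          rcases Bool.or_eq_true_iff.mp hkeep with h | h
          · exact pv_alnum_upper_ne_underscore c h
          · have := beq_iff_eq.mp h; subst this; decide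
        have hstep : normStepB st c
            = (st.1 ++ List.replicate st.2 '_' ++ [PySem.Chars.upperChar c], 0) := by
          unfold normStepB; rw [if_neg (by simp_all), if_pos hkeep]
        rw [hemit, hstep]
        refine ih _ (m ++ [PySem.Chars.upperChar c]) ?_ ?_ ?_ |>.imp ?_ id
        · simp only [List.replicate_zero, List.append_nil]
          rw [List.dropWhile_append]
          by_cases hm : (List.dropWhile (fun c => c == '_') m).isEmpty = true
          · rw [if_pos hm]
            have h1' : st.1 ++ List.replicate st.2 '_' = [] := by
              rw [h1]; simpa [List.isEmpty_iff] using hm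
            have hst1 : st.1 = [] := by
              rcases List.append_eq_nil_iff.mp h1' with ⟨h, _⟩; exact h
            have hst2 : st.2 = 0 := h2 hst1
            rw [hst1, hst2]
            simp [List.dropWhile_cons, hreal]
          · rw [if_neg hm, ← h1]
        · intro h; rfl
        · intro x hx
          simp only [List.getLast?_append, List.getLast?_singleton] at hx
          cases hx; exact hreal
        · intro h; simpa using h
      · -- emits nothing
        have hstep : normStepB st c = st := by
          unfold normStepB; rw [if_neg (by simp_all), if_neg (by simp_all)]
        have hemit : normCodeEmit c = none := by
          unfold normCodeEmit
          rw [if_neg]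
          intro hcond
          rcases Bool.or_eq_true_iff.mp hcond with hcond | h
          · rcases Bool.or_eq_true_iff.mp hcond with hcond | h
            · rcases Bool.or_eq_true_iff.mp hcond with h | h
              · simp [h] at hsp
              · simp [h] at hkeep
            · simp [h] at hsp
          · simp [h] at hkeep
        rw [hemit, hstep]
        exact ih st m h1 h2 h3

-- the final state's core equals the '_'-stripped emit stream
theorem pv_fold_eq_strip (cs : List Char) :
    ((cs.foldl normStepB (([] : List Char), 0)).1)
      = PySem.Chars.stripChars (cs.filterMap normCodeEmit) ['_'] := by
  obtain ⟨h1, h2, h3⟩ := pv_fold_main cs (([] : List Char), 0) []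
    (by rfl) (fun _ => rfl) (by intro x hx; simp at hx)
  rw [List.nil_append] at h1
  have hcontains : (fun c : Char => (['_'].contains c)) = (fun c : Char => c == '_') := by
    funext c; cases h : c == '_' <;> simp_all
  generalize hst : cs.foldl normStepB (([] : List Char), 0) = st at h1 h3 ⊢
  unfold PySem.Chars.stripChars
  dsimp only
  rw [hcontains, ← h1]
  rw [List.reverse_append, List.reverse_replicate]
  rw [pv_dropWhile_all _ (List.replicate st.2 '_') _
    (by intro x hx; simp [List.eq_of_mem_replicate hx])]
  cases hcore : st.1.reverse with
  | nil => simp [List.reverse_eq_nil_iff.mp hcore]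
  | cons y ys =>
    have hy : st.1.getLast? = some y := by
      rw [List.getLast?_eq_head?_reverse, hcore]; rfl
    have hyne : (y == '_') = false := by
      simpa using h3 y hy
    rw [List.dropWhile_cons, hyne]
    simp [← hcore]

theorem pv_norm_code_eq (v : String) : norm_code v = norm_code_alt v := by
  unfold norm_code norm_code_alt
  dsimp only
  rw [show ("" : String) = String.ofList [] from rfl, ← apply_ite String.ofList]
  refine congrArg String.ofList ?_
  rw [pv_A_eq_emit, pv_fold_eq_strip]

-- ===== VERDICT (by name: the statement is the Claim_ definition above) =====
theorem norm_code_spec : Claim_equal_norm_code := by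
  intro v _
  show norm_code v = norm_code_alt v
  exact pv_norm_code_eq v
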